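-- pv_equiv track=rewrite | github.com/shhuan1989/algorithms | codeforces/1365F.py | solve
-- ===== SOURCE A (Python) =====
-- import collections
--
-- def solve(N, A, B):
--
--     if N % 2 != 0:
--         if A[N//2] != B[N//2]:
--             return False
--
--     wca = collections.defaultdict(int)
--     for i in range(N//2):
--         a, b = A[i], A[N-i-1]
--         wca[min(a, b), max(a, b)] += 1
--     wcb = collections.defaultdict(int)
--     for i in range(N//2):
--         a, b = B[i], B[N - i - 1]
--         wcb[min(a, b), max(a, b)] += 1
--
--     return all([wca[k] == v for k, v in wcb.items()])
-- ===== SOURCE B (Python) =====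
-- def solve(N, A, B):
--     if N % 2 != 0 and A[N // 2] != B[N // 2]:
--         return False
--     half = N // 2
--     pa = sorted((min(A[i], A[N - 1 - i]), max(A[i], A[N - 1 - i])) for i in range(half))
--     pb = sorted((min(B[i], B[N - 1 - i]), max(B[i], B[N - 1 - i])) for i in range(half))
--     return pa == pb
-- ===== Notes on version B (the rewrite author's own statement) =====
-- stated objective: simpler
-- what changed: Replaces the two defaultdict frequency counters and the dict-comparison comprehension by building each half's list of (min,max) mirror pairs, sorting both lists, and comparing them directly.
import Mathlib
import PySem

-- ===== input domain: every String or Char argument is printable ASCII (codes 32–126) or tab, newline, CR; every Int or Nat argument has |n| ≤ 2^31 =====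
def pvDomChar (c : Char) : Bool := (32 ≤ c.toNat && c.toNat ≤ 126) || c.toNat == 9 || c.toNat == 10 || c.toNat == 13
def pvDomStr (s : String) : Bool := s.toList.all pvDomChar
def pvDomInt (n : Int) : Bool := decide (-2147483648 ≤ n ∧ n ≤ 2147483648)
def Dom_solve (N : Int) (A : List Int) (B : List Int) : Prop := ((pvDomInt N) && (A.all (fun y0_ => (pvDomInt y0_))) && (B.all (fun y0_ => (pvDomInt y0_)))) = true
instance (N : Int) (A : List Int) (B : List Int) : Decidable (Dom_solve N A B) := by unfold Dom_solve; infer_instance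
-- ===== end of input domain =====

-- B replaces A's two frequency dicts and the dict-comparison comprehension by sorting the
-- two lists of (min,max) mirror pairs and comparing them directly (objective: simpler).

-- ===== PORT A =====
def solve (N : Int) (A : List Int) (B : List Int) : Bool :=
  let m := PySem.Int.floordiv N 2
  if PySem.Int.mod N 2 != 0 && (PySem.List.pyGetD A m 0 != PySem.List.pyGetD B m 0) then
    false
  else
    let wca := (PySem.List.pyRange 0 m 1).foldl (fun d i =>
      let a := PySem.List.pyGetD A i 0
      let b := PySem.List.pyGetD A (N - i - 1) 0
      d.modify (min a b, max a b) 0 (· + 1)) (PySem.Dict.empty : PySem.Dict (Int × Int) Int)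
    let wcb := (PySem.List.pyRange 0 m 1).foldl (fun d i =>
      let a := PySem.List.pyGetD B i 0
      let b := PySem.List.pyGetD B (N - i - 1) 0
      d.modify (min a b, max a b) 0 (· + 1)) (PySem.Dict.empty : PySem.Dict (Int × Int) Int)
    ((wcb.items).map (fun kv => wca.getD kv.1 0 == kv.2)).all id

-- ===== PORT B =====
-- the list of (min, max) mirror pairs of the first half of L
def pvPairs (N : Int) (L : List Int) : List (Int × Int) :=
  (PySem.List.pyRange 0 (PySem.Int.floordiv N 2) 1).map (fun i =>
    (min (PySem.List.pyGetD L i 0) (PySem.List.pyGetD L (N - 1 - i) 0),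
     max (PySem.List.pyGetD L i 0) (PySem.List.pyGetD L (N - 1 - i) 0)))

def solve_alt (N : Int) (A : List Int) (B : List Int) : Bool :=
  if PySem.Int.mod N 2 != 0 && (PySem.List.pyGetD A (PySem.Int.floordiv N 2) 0 != PySem.List.pyGetD B (PySem.Int.floordiv N 2) 0) then
    false
  else
    PySem.List.sorted2 (pvPairs N A) (·.1) (·.2) false == PySem.List.sorted2 (pvPairs N B) (·.1) (·.2) false

-- ===== PRECONDITION & SPEC =====
-- Pre_ excludes exactly the inputs on which the Python A raises IndexError: for odd N the
-- middle index N//2 must be a valid (possibly negative) index of both lists, and — unless the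
-- odd-middle mismatch returns False before the loops run — N ≤ len(A) and N ≤ len(B) whenever
-- the loop range(N//2) is nonempty.
def Pre_solve (N : Int) (A : List Int) (B : List Int) : Prop :=
  (PySem.Int.mod N 2 ≠ 0 →
      PySem.Raise.InRange A.length (PySem.Int.floordiv N 2) ∧
      PySem.Raise.InRange B.length (PySem.Int.floordiv N 2)) ∧
  ((PySem.Int.mod N 2 ≠ 0 →
      PySem.List.pyGetD A (PySem.Int.floordiv N 2) 0 = PySem.List.pyGetD B (PySem.Int.floordiv N 2) 0) →
    0 < PySem.Int.floordiv N 2 →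
    N ≤ A.length ∧ N ≤ B.length)
instance (N : Int) (A : List Int) (B : List Int) : Decidable (Pre_solve N A B) := by unfold Pre_solve; infer_instance

def pvWitness_solve : Int × List Int × List Int := (4, [1, 2, 3, 4], [4, 3, 2, 1])

def Spec_solve (N : Int) (A : List Int) (B : List Int) (out : Bool) : Prop := out = solve_alt N A B
instance (N : Int) (A : List Int) (B : List Int) (out : Bool) : Decidable (Spec_solve N A B out) := by unfold Spec_solve; infer_instance

-- ===== CLAIM (what is proved, stated in full; the proofs are below) =====
def Claim_equal_solve : Prop := ∀ (N : Int) (A : List Int) (B : List Int), Dom_solve N A B → Pre_solve N A B → Spec_solve N A B (solve N A B)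

-- ===== LEMMAS AND PROOFS =====

-- strict lexicographic order on Int pairs, as sorted2 with keys fst, snd compares
def pvLt (p q : Int × Int) : Bool := decide (p.1 < q.1) || (!decide (q.1 < p.1) && decide (p.2 < q.2))

theorem pvLt_asymm {p q : Int × Int} (h : pvLt p q = true) : pvLt q p = false := by
  simp [pvLt] at *; omega

theorem pvLt_total_trans {p q r : Int × Int} (h1 : pvLt q p = false) (h2 : pvLt r q = false) :
    pvLt r p = false := by
  simp [pvLt] at *; omega

theorem pvLt_antisymm {p q : Int × Int} (h1 : pvLt p q = false) (h2 : pvLt q p = false) : p = q := by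
  simp [pvLt] at *
  have : p.1 = q.1 ∧ p.2 = q.2 := by omega
  exact Prod.ext this.1 this.2

theorem insertBy_pairwise (x : Int × Int) (ys : List (Int × Int))
    (h : ys.Pairwise (fun a b => pvLt b a = false)) :
    (PySem.List.insertBy pvLt x ys).Pairwise (fun a b => pvLt b a = false) := by
  induction ys with
  | nil => simp [PySem.List.insertBy]
  | cons y t ih =>
    rw [List.pairwise_cons] at h
    show ((if pvLt x y = true then x :: y :: t else y :: PySem.List.insertBy pvLt x t)).Pairwise _
    by_cases hxy : pvLt x y = true
    · rw [if_pos hxy]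
      refine List.Pairwise.cons ?_ (List.Pairwise.cons h.1 h.2)
      intro z hz
      rcases List.mem_cons.mp hz with hz1 | hz2
      · subst hz1; exact pvLt_asymm hxy
      · exact pvLt_total_trans (pvLt_asymm hxy) (h.1 z hz2)
    · rw [if_neg hxy]
      refine List.Pairwise.cons ?_ (ih h.2)
      intro z hz
      rcases (PySem.List.mem_insertBy pvLt x z t).mp hz with hz1 | hz2
      · subst hz1; exact Bool.eq_false_iff.mpr hxy
      · exact h.1 z hz2

theorem sorted2_pairs_pairwise (xs : List (Int × Int)) :
    (PySem.List.sorted2 xs (·.1) (·.2) false).Pairwise (fun a b => pvLt b a = false) := by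
  show (xs.foldl (fun acc x => PySem.List.insertBy _ x acc) []).Pairwise _
  have key : ∀ (l : List (Int × Int)) (acc : List (Int × Int)),
      acc.Pairwise (fun a b => pvLt b a = false) →
      (l.foldl (fun acc x => PySem.List.insertBy pvLt x acc) acc).Pairwise (fun a b => pvLt b a = false) := by
    intro l
    induction l with
    | nil => intro acc h; simpa using h
    | cons x t ih => intro acc h; exact ih _ (insertBy_pairwise x acc h)
  exact key xs [] (List.Pairwise.nil)

theorem sorted2_eq_iff_perm (xs ys : List (Int × Int)) :
    (PySem.List.sorted2 xs (·.1) (·.2) false = PySem.List.sorted2 ys (·.1) (·.2) false) ↔ xs.Perm ys := by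
  constructor
  · intro h
    have hx := PySem.List.sorted2_perm xs (·.1) (·.2) false
    have hy := PySem.List.sorted2_perm ys (·.1) (·.2) false
    exact (hx.symm.trans (h ▸ hy))
  · intro h
    have hp : (PySem.List.sorted2 xs (·.1) (·.2) false).Perm (PySem.List.sorted2 ys (·.1) (·.2) false) :=
      (PySem.List.sorted2_perm xs (·.1) (·.2) false).trans
        (h.trans (PySem.List.sorted2_perm ys (·.1) (·.2) false).symm)
    exact List.Perm.eq_of_pairwise (fun a b _ _ h1 h2 => pvLt_antisymm h2 h1)
      (sorted2_pairs_pairwise xs) (sorted2_pairs_pairwise ys) hp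

theorem count_all_iff_perm (pa pb : List (Int × Int)) (hlen : pa.length = pb.length) :
    (∀ k ∈ pb, pa.count k = pb.count k) ↔ pa.Perm pb := by
  constructor
  · intro h
    have hsub : pb.Subperm pa := by
      rw [List.subperm_ext_iff]
      intro x hx
      exact le_of_eq (h x hx).symm
    exact (hsub.perm_of_length_le (le_of_eq hlen)).symm
  · intro h k _
    exact h.count_eq k

-- A's dict fold is the PySem counter of B's pair list
theorem fold_eq_counter (N : Int) (L : List Int) :
    (PySem.List.pyRange 0 (PySem.Int.floordiv N 2) 1).foldl (fun d i =>
      d.modify (min (PySem.List.pyGetD L i 0) (PySem.List.pyGetD L (N - i - 1) 0),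
                max (PySem.List.pyGetD L i 0) (PySem.List.pyGetD L (N - i - 1) 0)) 0 (· + 1))
      (PySem.Dict.empty : PySem.Dict (Int × Int) Int)
    = PySem.Dict.counter (pvPairs N L) := by
  rw [PySem.Dict.counter_eq_foldl, pvPairs, List.foldl_map]
  apply PySem.List.foldl_congr_mem
  intro d i _
  have h : N - 1 - i = N - i - 1 := by ring
  rw [h]

theorem solve_eq_alt (N : Int) (A : List Int) (B : List Int) : solve N A B = solve_alt N A B := by
  unfold solve solve_alt
  dsimp only
  split
  · rfl
  · simp only [fold_eq_counter]
    rw [Bool.eq_iff_iff, List.all_eq_true, beq_iff_eq, sorted2_eq_iff_perm,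
        ← count_all_iff_perm _ _ (by simp [pvPairs]), List.forall_mem_map]
    simp only [id_eq, beq_iff_eq, PySem.Dict.items_counter, List.forall_mem_map,
      PySem.Dict.getD_counter]
    constructor
    · intro h k hk
      have hk' : k ∈ PySem.Set.ofList (pvPairs N B) := by
        simpa [PySem.Set.mem_ofList] using hk
      exact_mod_cast h k hk'
    · intro h k hk
      have hk' : k ∈ pvPairs N B := by
        simpa [PySem.Set.mem_ofList] using hk
      exact_mod_cast h k hk'

-- ===== VERDICT (by name: the statement is the Claim_ definition above) =====
theorem solve_spec : Claim_equal_solve := by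
  intro N A B _ _
  unfold Spec_solve
  exact solve_eq_alt N A B
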